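-- pv_equiv track=rewrite | github.com/thierryxdp/TCC | problems/807/solution_212238.py | conta_frases
-- ===== SOURCE A (Python) =====
-- def conta_frases(texto):
--     total = 0
--     for i in range(len(texto)):
--         if i > 0 and texto[i - 1] == ".":
--             continue
--         if texto[i] in (".", "?", "!"):
--             total += 1
--     return total
-- ===== SOURCE B (Python) =====
-- def conta_frases(texto):
--     term = ".?!"
--     total = sum(1 for c in texto if c in term)
--     overlap = sum(1 for p, c in zip(texto, texto[1:]) if p == "." and c in term)
--     return total - overlap
-- ===== Notes on version B (the rewrite author's own statement) =====
-- stated objective: alternative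
-- what changed: Replaced the index loop with a backward look and a continue by two independent counts: total terminators minus terminators immediately preceded by '.', computed over the string and its pairwise zip.
import Mathlib
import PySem

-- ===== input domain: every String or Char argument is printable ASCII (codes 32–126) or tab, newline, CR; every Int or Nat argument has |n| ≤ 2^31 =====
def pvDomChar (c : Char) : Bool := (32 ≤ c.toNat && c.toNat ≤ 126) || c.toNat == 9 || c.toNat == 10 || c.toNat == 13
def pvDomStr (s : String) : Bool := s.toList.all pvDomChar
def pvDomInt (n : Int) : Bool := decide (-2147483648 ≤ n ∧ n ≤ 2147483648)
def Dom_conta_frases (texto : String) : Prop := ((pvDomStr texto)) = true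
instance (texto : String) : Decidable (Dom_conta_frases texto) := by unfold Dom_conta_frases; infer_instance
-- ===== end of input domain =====

-- B counts all terminators and subtracts those immediately preceded by '.', instead of A's index loop with a skip; same cost, different decomposition.

-- ===== PORT A =====
def conta_frases (texto : String) : Int :=
  let l := texto.toList
  (PySem.List.pyRange 0 (l.length : Int) 1).foldl
    (fun total i =>
      if i > 0 && (PySem.List.pyGetD l (i - 1) ' ' == '.') then total
      else if PySem.List.pyGetD l i ' ' == '.' || PySem.List.pyGetD l i ' ' == '?'
              || PySem.List.pyGetD l i ' ' == '!' then total + 1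
      else total) 0

-- ===== PORT B =====
def conta_frases_alt (texto : String) : Int :=
  let l := texto.toList
  let total := l.countP (fun c => c == '.' || c == '?' || c == '!')
  let overlap := (l.zip l.tail).countP
      (fun pc => pc.1 == '.' && (pc.2 == '.' || pc.2 == '?' || pc.2 == '!'))
  (total : Int) - (overlap : Int)

-- ===== PRECONDITION & SPEC =====
def Spec_conta_frases (texto : String) (out : Int) : Prop := out = conta_frases_alt texto
instance (texto : String) (out : Int) : Decidable (Spec_conta_frases texto out) := by unfold Spec_conta_frases; infer_instance

-- ===== CLAIM (what is proved, stated in full; the proofs are below) =====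
def Claim_equal_conta_frases : Prop := ∀ (texto : String), Dom_conta_frases texto → Spec_conta_frases texto (conta_frases texto)

-- ===== LEMMAS AND PROOFS =====

-- terminator test and the pairwise fold body used in the proofs
def pvTerm (c : Char) : Bool := c == '.' || c == '?' || c == '!'

def pvBad (pc : Char × Char) : Bool := pc.1 == '.' && pvTerm pc.2

def pvF (total : Int) (pc : Char × Char) : Int :=
  if pc.1 == '.' then total
  else if pvTerm pc.2 then total + 1 else total

-- A's loop body, at an in-range index, reads exactly the pair (predecessor-or-space, current char)
lemma pvBody_eq (l : List Char) (total : Int) (i : Int)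
    (h0 : 0 ≤ i) (h1 : i < (l.length : Int)) :
    (if i > 0 && (PySem.List.pyGetD l (i - 1) ' ' == '.') then total
     else if PySem.List.pyGetD l i ' ' == '.' || PySem.List.pyGetD l i ' ' == '?'
             || PySem.List.pyGetD l i ' ' == '!' then total + 1
     else total)
    = pvF total (PySem.List.pyGetD ((' ' :: l).zip l) i (' ', ' ')) := by
  have hp : PySem.List.pyGetD ((' ' :: l).zip l) i (' ', ' ')
      = ((' ' :: l).zip l)[i.toNat]'(by simp; omega) := by
    rw [PySem.List.pyGetD_eq_getElem]
    all_goals first | omega | (simp; omega)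
  have hi : PySem.List.pyGetD l i ' ' = l[i.toNat]'(by omega) := by
    rw [PySem.List.pyGetD_eq_getElem]
    all_goals omega
  have hz1 : ((' ' :: l).zip l)[i.toNat]'(by simp; omega)
      = ((' ' :: l)[i.toNat]'(by simp; omega), l[i.toNat]'(by omega)) := by
    simp [List.getElem_zip]
  rcases lt_or_ge 0 i with hpos | hz
  · obtain ⟨k, hk⟩ : ∃ k, i.toNat = k + 1 := ⟨i.toNat - 1, by omega⟩
    have hprev : PySem.List.pyGetD l (i - 1) ' ' = l[k]'(by omega) := by
      rw [PySem.List.pyGetD_eq_getElem]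
      · simp only [show (i - 1).toNat = k from by omega]
      all_goals omega
    have hcons : (' ' :: l)[i.toNat]'(by simp; omega) = l[k]'(by omega) := by
      simp only [hk]
      simp
    rw [hp, hz1]
    simp only [hi, hprev, hcons, pvF, pvTerm]
    simp [hpos]
  · have hi0 : i = 0 := le_antisymm hz h0
    subst hi0
    rw [hp, hz1]
    simp [pvF, pvTerm, hi]

-- the pairwise fold equals total-terminators minus bad-pairs
lemma pvFold_eq (l : List Char) : ∀ (prev : Char) (acc : Int),
    ((prev :: l).zip l).foldl pvF acc
      = acc + (l.countP pvTerm : Int) - (((prev :: l).zip l).countP pvBad : Int) := by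
  induction l with
  | nil => intro prev acc; simp
  | cons c rest ih =>
      intro prev acc
      have hzip : ((prev :: c :: rest).zip (c :: rest))
          = (prev, c) :: ((c :: rest).zip rest) := by simp
      rw [hzip, List.foldl_cons, ih c (pvF acc (prev, c))]
      rw [List.countP_cons, List.countP_cons]
      unfold pvF pvBad pvTerm
      by_cases h1 : prev = '.' <;> by_cases h2 : c == '.' || c == '?' || c == '!' <;>
        simp [h1, h2] <;> ring

theorem conta_frases_spec : Claim_equal_conta_frases := by
  intro texto _
  unfold Spec_conta_frases conta_frases conta_frases_alt
  set l := texto.toList with hl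
  simp only []
  have hlen : (l.length : Int) = (((' ' :: l).zip l).length : Int) := by
    rw [List.length_zip]; simp
  have hstep :
      (PySem.List.pyRange 0 (l.length : Int) 1).foldl
        (fun total i =>
          if i > 0 && (PySem.List.pyGetD l (i - 1) ' ' == '.') then total
          else if PySem.List.pyGetD l i ' ' == '.' || PySem.List.pyGetD l i ' ' == '?'
                  || PySem.List.pyGetD l i ' ' == '!' then total + 1
          else total) 0
      = (PySem.List.pyRange 0 (l.length : Int) 1).foldl
          (fun total i => pvF total (PySem.List.pyGetD ((' ' :: l).zip l) i (' ', ' '))) 0 := by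
    apply PySem.List.foldl_congr_mem
    intro acc i hi
    have := (PySem.List.mem_pyRange_one).mp hi
    exact pvBody_eq l acc i this.1 this.2
  rw [hstep, hlen, PySem.List.foldl_pyRange_zero_pyGetD' ((' ' :: l).zip l) (' ', ' ') pvF 0,
      pvFold_eq l ' ' 0]
  have hbad : ((' ' :: l).zip l).countP pvBad = (l.zip l.tail).countP pvBad := by
    cases l with
    | nil => simp
    | cons c rest => simp [pvBad]
  rw [hbad]
  have ht : (fun c => c == '.' || c == '?' || c == '!') = pvTerm := rfl
  have hb : (fun pc : Char × Char => pc.1 == '.' && (pc.2 == '.' || pc.2 == '?' || pc.2 == '!'))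
      = pvBad := rfl
  rw [ht, hb]
  omega
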